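-- pv_equiv track=rewrite | github.com/wojcikiewicz17/Vectras-VM-Android | tools/state_geometry_lab/py/state_geometry_lab.py | random_permutations_72
-- ===== SOURCE A (Python) =====
-- from typing import Dict, List, Optional, Sequence, Tuple
--
-- def random_permutations_72(seed_digits: Sequence[int], levels: int = 72) -> List[List[int]]:
--     base = list(range(levels))
--     out = []
--     for i in range(levels):
--         shift = seed_digits[i % len(seed_digits)]
--         rotated = base[shift:] + base[:shift]
--         if i % 2 == 0:
--             rotated = list(reversed(rotated))
--         out.append(rotated)
--         base = rotated
--     return out
-- ===== SOURCE B (Python) =====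
-- from typing import List, Sequence
--
-- def random_permutations_72(seed_digits: Sequence[int], levels: int = 72) -> List[List[int]]:
--     # Track the current permutation as an affine index map j -> (a*j + b) % levels
--     # instead of materialising slices and reversals.
--     n = len(seed_digits)
--     a, b = 1, 0
--     out = []
--     for i in range(levels):
--         shift = seed_digits[i % n]
--         s = shift if -levels <= shift <= levels else 0
--         b = (b + a * s) % levels
--         if i % 2 == 0:
--             b = (a * (levels - 1) + b) % levels
--             a = -a
--         out.append([(a * j + b) % levels for j in range(levels)])
--     return out
-- ===== Notes on version B (the rewrite author's own statement) =====
-- stated objective: alternative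
-- what changed: B replaces the materialised slice-rotate-and-reverse of the running list by an affine index map: it tracks two integers a (slope, +/-1) and b (offset) and emits each row as [(a*j+b) % levels for j in range(levels)], with out-of-range shifts clamped to 0 to match Python slice semantics.
import Mathlib
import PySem

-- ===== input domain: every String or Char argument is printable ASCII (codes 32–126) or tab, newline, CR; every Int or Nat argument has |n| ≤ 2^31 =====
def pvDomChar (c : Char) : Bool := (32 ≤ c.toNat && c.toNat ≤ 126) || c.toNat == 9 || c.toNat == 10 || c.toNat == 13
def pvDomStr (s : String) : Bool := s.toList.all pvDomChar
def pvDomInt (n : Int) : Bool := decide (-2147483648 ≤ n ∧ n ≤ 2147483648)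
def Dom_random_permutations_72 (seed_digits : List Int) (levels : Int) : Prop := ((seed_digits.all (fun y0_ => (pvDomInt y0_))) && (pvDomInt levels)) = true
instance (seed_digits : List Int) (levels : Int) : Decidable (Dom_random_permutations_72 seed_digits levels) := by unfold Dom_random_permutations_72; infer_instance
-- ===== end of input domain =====

-- B tracks the running permutation as an affine index map (slope a, offset b) instead of
-- slicing/reversing the list each step; same rows, same cost class (alternative decomposition).

-- ===== PORT A =====
-- loop body of A (shift, rotate by slicing, reverse on even i, append)
def stepA (seed : List Int) (st : List Int × List (List Int)) (i : Int) : List Int × List (List Int) :=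
  let shift := PySem.List.pyGetD seed (PySem.Int.mod i (seed.length : Int)) 0
  let rotated := PySem.List.slice st.1 (some shift) none ++ PySem.List.slice st.1 none (some shift)
  let rotated2 := if PySem.Int.mod i 2 = 0 then rotated.reverse else rotated
  (rotated2, st.2 ++ [rotated2])

def random_permutations_72 (seed_digits : List Int) (levels : Int) : List (List Int) :=
  ((PySem.List.pyRange 0 levels 1).foldl (stepA seed_digits) (PySem.List.pyRange 0 levels 1, [])).2

-- ===== PORT B =====
-- B's row comprehension [(a*j+b) % levels for j in range(levels)]
def altRow (levels a b : Int) : List Int :=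
  (PySem.List.pyRange 0 levels 1).map (fun j => PySem.Int.mod (a * j + b) levels)

-- loop body of B (clamp shift, update offset, flip slope on even i, emit affine row)
def stepB (seed : List Int) (levels : Int) (st : Int × Int × List (List Int)) (i : Int) : Int × Int × List (List Int) :=
  let shift := PySem.List.pyGetD seed (PySem.Int.mod i (seed.length : Int)) 0
  let s := if -levels ≤ shift ∧ shift ≤ levels then shift else 0
  let b1 := PySem.Int.mod (st.2.1 + st.1 * s) levels
  let ab := if PySem.Int.mod i 2 = 0 then (-st.1, PySem.Int.mod (st.1 * (levels - 1) + b1) levels) else (st.1, b1)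
  (ab.1, ab.2, st.2.2 ++ [altRow levels ab.1 ab.2])

def random_permutations_72_alt (seed_digits : List Int) (levels : Int) : List (List Int) :=
  ((PySem.List.pyRange 0 levels 1).foldl (stepB seed_digits levels) (1, 0, [])).2.2

-- ===== PRECONDITION & SPEC =====
-- Pre_ excludes empty seed_digits with levels > 0, on which Python A raises ZeroDivisionError (i % len(seed_digits)).
def Pre_random_permutations_72 (seed_digits : List Int) (levels : Int) : Prop :=
  seed_digits ≠ [] ∨ levels ≤ 0
instance (seed_digits : List Int) (levels : Int) : Decidable (Pre_random_permutations_72 seed_digits levels) := by unfold Pre_random_permutations_72; infer_instance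

def pvWitness_random_permutations_72 : List Int × Int := ([3, 1, 4], 6)

def Spec_random_permutations_72 (seed_digits : List Int) (levels : Int) (out : List (List Int)) : Prop := out = random_permutations_72_alt seed_digits levels
instance (seed_digits : List Int) (levels : Int) (out : List (List Int)) : Decidable (Spec_random_permutations_72 seed_digits levels out) := by unfold Spec_random_permutations_72; infer_instance

-- ===== CLAIM (what is proved, stated in full; the proofs are below) =====
def Claim_equal_random_permutations_72 : Prop := ∀ (seed_digits : List Int) (levels : Int), Dom_random_permutations_72 seed_digits levels → Pre_random_permutations_72 seed_digits levels → Spec_random_permutations_72 seed_digits levels (random_permutations_72 seed_digits levels)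

-- ===== LEMMAS AND PROOFS =====

-- the affine row, in emod form over List.range
def mrow (n : Nat) (L a b : Int) : List Int :=
  (List.range n).map (fun (k : Nat) => (a * (k : Int) + b) % L)

lemma altRow_eq_mrow (L a b : Int) (hL : 0 < L) : altRow L a b = mrow L.toNat L a b := by
  unfold altRow mrow
  rw [PySem.List.pyRange_one, List.map_map]
  simp only [sub_zero]
  apply List.map_congr_left
  intro k _
  simp only [Function.comp_apply, zero_add]
  rw [PySem.Int.mod_eq_emod_of_pos hL]

lemma mrow_congr (n : Nat) (L a b₁ b₂ : Int) (h : b₁ % L = b₂ % L) :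
    mrow n L a b₁ = mrow n L a b₂ := by
  unfold mrow
  apply List.map_congr_left
  intro k _
  rw [Int.add_emod (a * k) b₁ L, h, ← Int.add_emod]

lemma mrow_reverse (n : Nat) (L a b : Int) :
    (mrow n L a b).reverse = mrow n L (-a) (a * ((n : Int) - 1) + b) := by
  apply List.ext_getElem
  · simp [mrow]
  · intro i h1 h2
    have hi : i < n := by simpa [mrow] using h2
    rw [List.getElem_reverse]
    simp only [mrow, List.getElem_map, List.getElem_range, List.length_map, List.length_range]
    congr 1
    have hc : ((n - 1 - i : Nat) : Int) = (n : Int) - 1 - (i : Int) := by omega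
    rw [hc]; ring

lemma mrow_rotate (n : Nat) (L a b : Int) (c : Nat) (hc : c ≤ n) (hnL : (n : Int) = L) :
    (mrow n L a b).drop c ++ (mrow n L a b).take c = mrow n L a (a * (c : Int) + b) := by
  apply List.ext_getElem
  · simp [mrow]; omega
  · intro i h1 h2
    have hi : i < n := by simpa [mrow] using h2
    have hdl : ((mrow n L a b).drop c).length = n - c := by simp [mrow]
    rw [List.getElem_append]
    split
    · rename_i hlt
      rw [List.getElem_drop]
      simp only [mrow, List.getElem_map, List.getElem_range]
      congr 1
      push_cast
      ring
    · rename_i hge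
      rw [List.getElem_take]
      simp only [mrow, List.getElem_map, List.getElem_range, List.length_drop,
        List.length_map, List.length_range]
      rw [hdl] at hge
      have hj : ((i - (n - c) : Nat) : Int) = (i : Int) + (c : Int) - (n : Int) := by omega
      rw [hj]
      rw [show a * ((i : Int) + (c : Int) - (n : Int)) + b
            = (a * (i : Int) + (a * (c : Int) + b)) + (-a) * L by rw [← hnL]; ring]
      simp

lemma clamp_cases (n : Nat) (L shift : Int) (hnL : (n : Int) = L) :
    ((PySem.List.clampIdx n shift : Nat) : Int) = (if -L ≤ shift ∧ shift ≤ L then shift else 0) ∨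
    ((PySem.List.clampIdx n shift : Nat) : Int) = (if -L ≤ shift ∧ shift ≤ L then shift else 0) + L := by
  unfold PySem.List.clampIdx
  split_ifs <;> omega

lemma slice_none_some (xs : List Int) (i : Int) :
    PySem.List.slice xs none (some i) = xs.take (PySem.List.clampIdx xs.length i) := by
  simp [PySem.List.slice]

lemma length_altRow (L a b : Int) : (altRow L a b).length = L.toNat := by
  simp [altRow, PySem.List.length_pyRange_one]

lemma rev_row (L a b : Int) (hL : 0 < L) :
    (altRow L a b).reverse = altRow L (-a) (PySem.Int.mod (a * (L - 1) + b) L) := by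
  rw [altRow_eq_mrow _ _ _ hL, altRow_eq_mrow _ _ _ hL, mrow_reverse]
  apply mrow_congr
  rw [show ((L.toNat : Nat) : Int) = L by omega]
  rw [PySem.Int.mod_eq_emod_of_pos hL]
  rw [Int.emod_emod_of_dvd _ dvd_rfl]

lemma rot_row (L shift a b : Int) (hL : 0 < L) :
    PySem.List.slice (altRow L a b) (some shift) none ++
      PySem.List.slice (altRow L a b) none (some shift)
    = altRow L a (PySem.Int.mod (b + a * (if -L ≤ shift ∧ shift ≤ L then shift else 0)) L) := by
  rw [PySem.List.slice_some_none, slice_none_some, length_altRow]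
  rw [altRow_eq_mrow _ _ _ hL, altRow_eq_mrow _ _ _ hL]
  have hcle : PySem.List.clampIdx L.toNat shift ≤ L.toNat := by
    unfold PySem.List.clampIdx; split_ifs <;> omega
  rw [mrow_rotate L.toNat L a b _ hcle (by omega)]
  apply mrow_congr
  rw [PySem.Int.mod_eq_emod_of_pos hL, Int.emod_emod_of_dvd _ dvd_rfl]
  rcases clamp_cases L.toNat L shift (by omega) with h | h
  · rw [h]; ring_nf
  · rw [h]
    rw [show a * ((if -L ≤ shift ∧ shift ≤ L then shift else 0) + L) + b
          = (b + a * (if -L ≤ shift ∧ shift ≤ L then shift else 0)) + a * L by ring]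
    simp

lemma step_eq (seed : List Int) (L : Int) (hL : 0 < L) (i a b : Int)
    (base : List Int) (outA outB : List (List Int))
    (hbase : base = altRow L a b) (hout : outA = outB) :
    (stepA seed (base, outA) i).1 =
      altRow L ((stepB seed L (a, b, outB) i).1) ((stepB seed L (a, b, outB) i).2.1) ∧
    (stepA seed (base, outA) i).2 = (stepB seed L (a, b, outB) i).2.2 := by
  subst hbase hout
  by_cases hpar : PySem.Int.mod i 2 = 0 <;>
    simp only [stepA, stepB, hpar, if_true, if_false, rot_row _ _ _ _ hL,
      rev_row _ _ _ hL] <;> exact ⟨trivial, trivial⟩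

lemma loop_inv (seed : List Int) (L : Int) (hL : 0 < L) :
    ∀ (l : List Int) (base : List Int) (a b : Int) (outA outB : List (List Int)),
      base = altRow L a b → outA = outB →
      (l.foldl (stepA seed) (base, outA)).2 = (l.foldl (stepB seed L) (a, b, outB)).2.2 := by
  intro l
  induction l with
  | nil => intro base a b outA outB hbase hout; simpa using hout
  | cons i l ih =>
    intro base a b outA outB hbase hout
    simp only [List.foldl_cons]
    obtain ⟨h1, h2⟩ := step_eq seed L hL i a b base outA outB hbase hout
    exact ih (stepA seed (base, outA) i).1 ((stepB seed L (a, b, outB) i).1)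
      ((stepB seed L (a, b, outB) i).2.1) (stepA seed (base, outA) i).2
      ((stepB seed L (a, b, outB) i).2.2) h1 h2

lemma init_row (L : Int) : PySem.List.pyRange 0 L 1 = altRow L 1 0 := by
  unfold altRow
  rw [eq_comm]
  conv_rhs => rw [← List.map_id (PySem.List.pyRange 0 L 1)]
  apply List.map_congr_left
  intro j hj
  rw [PySem.List.mem_pyRange_one] at hj
  simp only [one_mul, add_zero, id]
  rw [PySem.Int.mod_eq_emod_of_pos (by omega)]
  exact Int.emod_eq_of_lt hj.1 hj.2

-- ===== VERDICT (by name: the statement is the Claim_ definition above) =====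
theorem random_permutations_72_spec : Claim_equal_random_permutations_72 := by
  intro seed L _ _
  unfold Spec_random_permutations_72 random_permutations_72 random_permutations_72_alt
  by_cases hL : 0 < L
  · exact loop_inv seed L hL _ _ 1 0 [] [] (init_row L) rfl
  · rw [PySem.List.pyRange_one_eq_nil (by omega)]
    rfl
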